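-- pv_equiv track=rewrite | github.com/Kzlo7/proyecto-algoritmos | proyecto/prueba/prueba.py | tresp
-- ===== SOURCE A (Python) =====
-- import operator
--
-- def tresp(ini):
--     dic={}
--     for i in range(0,len(ini)):
--         dic[i]=ini[i]
--
--     dicor = sorted(dic.items(), key=operator.itemgetter(1))
--     m1=dicor[1]
--     m2=dicor[2]
--     m3=dicor[3]
--     return m1,m2,m3
-- ===== SOURCE B (Python) =====
-- def tresp(ini):
--     remaining = list(range(len(ini)))
--     picks = []
--     for _ in range(4):
--         best = remaining[0]
--         for i in remaining[1:]:
--             if ini[i] < ini[best]: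
--                 best = i
--         picks.append((best, ini[best]))
--         remaining.remove(best)
--     return picks[1], picks[2], picks[3]
-- ===== Notes on version B (the rewrite author's own statement) =====
-- stated objective: alternative
-- what changed: Instead of building an index dict and fully sorting its n items, B runs exactly four rounds of selection (scan the ascending remaining-index list with strict '<' so the lowest index wins ties) and returns picks 1,2,3, never sorting the whole list.
import Mathlib
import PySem

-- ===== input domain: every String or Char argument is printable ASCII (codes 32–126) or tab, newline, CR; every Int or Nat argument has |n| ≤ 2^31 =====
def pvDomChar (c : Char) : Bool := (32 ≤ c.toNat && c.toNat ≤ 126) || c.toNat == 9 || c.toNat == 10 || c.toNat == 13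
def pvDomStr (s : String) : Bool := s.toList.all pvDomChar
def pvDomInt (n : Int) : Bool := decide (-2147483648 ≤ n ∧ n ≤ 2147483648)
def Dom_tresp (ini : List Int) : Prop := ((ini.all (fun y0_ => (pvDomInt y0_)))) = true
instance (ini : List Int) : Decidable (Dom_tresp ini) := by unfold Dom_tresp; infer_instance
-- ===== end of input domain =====

-- B replaces A's dict build + full sort by four selection rounds over the remaining indices (strict '<' scan, ascending order, so the lowest index wins ties).

-- ===== PORT A =====
def tresp (ini : List Int) : (Int × Int) × (Int × Int) × (Int × Int) :=
  let dic : PySem.Dict Int Int :=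
    (PySem.List.pyRange 0 ini.length 1).foldl
      (fun d i => d.insert i (PySem.List.pyGetD ini i 0)) PySem.Dict.empty
  let dicor := PySem.List.sorted dic.items (fun p => p.2)
  let m1 := PySem.List.pyGetD dicor 1 (0, 0)
  let m2 := PySem.List.pyGetD dicor 2 (0, 0)
  let m3 := PySem.List.pyGetD dicor 3 (0, 0)
  (m1, m2, m3)

-- ===== PORT B =====
def tresp_alt (ini : List Int) : (Int × Int) × (Int × Int) × (Int × Int) :=
  let st :=
    (PySem.List.pyRange 0 4 1).foldl
      (fun (st : List Int × List (Int × Int)) _ =>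
        let rem := st.1
        let best :=
          (PySem.List.slice rem (some 1) none).foldl
            (fun b i =>
              if PySem.List.pyGetD ini i 0 < PySem.List.pyGetD ini b 0 then i else b)
            (PySem.List.pyGetD rem 0 0)
        ((PySem.List.remove? rem best).getD rem,
         st.2 ++ [(best, PySem.List.pyGetD ini best 0)]))
      (PySem.List.pyRange 0 ini.length 1, [])
  (PySem.List.pyGetD st.2 1 (0, 0), PySem.List.pyGetD st.2 2 (0, 0),
   PySem.List.pyGetD st.2 3 (0, 0))

-- ===== PRECONDITION & SPEC =====
-- A raises IndexError (dicor[3]) when len(ini) < 4; B's picks[3] raises there too.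
def Pre_tresp (ini : List Int) : Prop := 4 ≤ ini.length
instance (ini : List Int) : Decidable (Pre_tresp ini) := by unfold Pre_tresp; infer_instance
def pvWitness_tresp : List Int := [3, 1, 2, 0, 1]

def Spec_tresp (ini : List Int) (out : (Int × Int) × (Int × Int) × (Int × Int)) : Prop := out = tresp_alt ini
instance (ini : List Int) (out : (Int × Int) × (Int × Int) × (Int × Int)) : Decidable (Spec_tresp ini out) := by unfold Spec_tresp; infer_instance

-- ===== CLAIM (what is proved, stated in full; the proofs are below) =====
def Claim_equal_tresp : Prop := ∀ (ini : List Int), Dom_tresp ini → Pre_tresp ini → Spec_tresp ini (tresp ini)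

-- ===== LEMMAS AND PROOFS =====

-- the value read at index i (all indices used below are in range)
def pvGet (ini : List Int) (i : Int) : Int := PySem.List.pyGetD ini i 0

-- the inner scan of B: running best index under strict '<'
def pvScan (ini : List Int) (b : Int) (t : List Int) : Int :=
  t.foldl (fun b i => if pvGet ini i < pvGet ini b then i else b) b

lemma pvScan_mem (ini : List Int) : ∀ (t : List Int) (b : Int), pvScan ini b t ∈ b :: t := by
  intro t
  induction t with
  | nil => intro b; simp [pvScan]
  | cons i t ih =>
    intro b
    simp only [pvScan, List.foldl_cons]
    by_cases h : pvGet ini i < pvGet ini b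
    · rw [if_pos h]
      have := ih i
      simp only [pvScan] at this
      rcases List.mem_cons.mp this with h' | h' <;> simp [h']
    · rw [if_neg h]
      have := ih b
      simp only [pvScan] at this
      rcases List.mem_cons.mp this with h' | h' <;> simp [h']

lemma pvScan_spec (ini : List Int) : ∀ (t : List Int) (b : Int),
    t.Pairwise (· < ·) → (∀ x ∈ t, b < x) →
    pvGet ini (pvScan ini b t) ≤ pvGet ini b ∧
    ∀ x ∈ b :: t, x ≠ pvScan ini b t →
      pvGet ini (pvScan ini b t) < pvGet ini x ∨
      (pvGet ini (pvScan ini b t) = pvGet ini x ∧ pvScan ini b t < x) := by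
  intro t
  induction t with
  | nil => intro b _ _; simp [pvScan]
  | cons i t ih =>
    intro b hpw hlt
    have hpw' : t.Pairwise (· < ·) := hpw.of_cons
    have hit : ∀ x ∈ t, i < x := by
      intro x hx; exact (List.pairwise_cons.mp hpw).1 x hx
    have hbi : b < i := hlt i (by simp)
    by_cases h : pvGet ini i < pvGet ini b
    · -- best moves to i
      have hstep : pvScan ini b (i :: t) = pvScan ini i t := by
        simp [pvScan, h]
      obtain ⟨hle, hmin⟩ := ih i hpw' hit
      rw [hstep]
      refine ⟨le_of_lt (lt_of_le_of_lt hle h), ?_⟩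
      intro x hx hne
      rcases List.mem_cons.mp hx with hx | hx
      · subst hx; left; exact lt_of_le_of_lt hle h
      · rcases List.mem_cons.mp hx with hx | hx
        · subst hx; exact hmin x (by simp) hne
        · exact hmin x (by simp [hx]) hne
    · -- best stays b
      have hstep : pvScan ini b (i :: t) = pvScan ini b t := by
        simp [pvScan, h]
      have hbt : ∀ x ∈ t, b < x := fun x hx => hlt x (by simp [hx])
      obtain ⟨hle, hmin⟩ := ih b hpw' hbt
      rw [hstep]
      refine ⟨hle, ?_⟩
      intro x hx hne
      rcases List.mem_cons.mp hx with hx | hx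
      · exact hmin x (by simp [hx]) hne
      rcases List.mem_cons.mp hx with hx | hx
      · -- x = i, the discarded element
        subst hx
        rw [not_lt] at h
        by_cases he : pvGet ini (pvScan ini b t) = pvGet ini x
        · right
          refine ⟨he, ?_⟩
          have : pvGet ini b ≤ pvGet ini x := h
          have hr := pvScan_mem ini t b
          rcases List.mem_cons.mp hr with hr | hr
          · rw [hr]; exact hbi
          · -- scan ∈ t, but then value < get b would contradict he? not nec
            by_cases hrb : pvScan ini b t = b
            · rw [hrb]; exact hbi
            · have := hmin b (by simp) (fun hh => hrb hh.symm)
              rcases this with hlt' | ⟨heq, hlt'⟩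
              · omega
              · -- scan < b < i = x
                exact lt_trans hlt' hbi
        · left
          exact lt_of_le_of_ne (le_trans hle h) he
      · exact hmin x (by simp [hx]) hne

def pvSel (ini : List Int) : List Int → List (Int × Int)
  | [] => []
  | b0 :: t =>
    let b := pvScan ini b0 t
    (b, pvGet ini b) :: pvSel ini ((b0 :: t).erase b)
termination_by rem => rem.length
decreasing_by
  have h : b ∈ b0 :: t := pvScan_mem ini t b0
  rw [List.length_erase_of_mem h]
  simp

lemma pvSel_mem (ini : List Int) : ∀ (rem : List Int), ∀ p ∈ pvSel ini rem,
    p.1 ∈ rem ∧ p.2 = pvGet ini p.1 := by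
  intro rem
  induction rem using pvSel.induct ini with
  | case1 => simp [pvSel]
  | case2 b0 t b ih =>
    intro p hp
    rw [pvSel] at hp
    rcases List.mem_cons.mp hp with h | h
    · rw [h]; exact ⟨pvScan_mem ini t b0, rfl⟩
    · obtain ⟨h1, h2⟩ := ih p h
      exact ⟨List.mem_of_mem_erase h1, h2⟩

lemma pvSel_perm (ini : List Int) : ∀ (rem : List Int),
    (pvSel ini rem).Perm (rem.map (fun i => (i, pvGet ini i))) := by
  intro rem
  induction rem using pvSel.induct ini with
  | case1 => simp [pvSel]
  | case2 b0 t b ih =>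
    rw [pvSel]
    have hmem : pvScan ini b0 t ∈ b0 :: t := pvScan_mem ini t b0
    have hperm : (b0 :: t).Perm (pvScan ini b0 t :: (b0 :: t).erase (pvScan ini b0 t)) :=
      List.perm_cons_erase hmem
    refine List.Perm.trans (List.Perm.cons _ ih) ?_
    have : ((pvScan ini b0 t, pvGet ini (pvScan ini b0 t)) ::
        ((b0 :: t).erase (pvScan ini b0 t)).map (fun i => (i, pvGet ini i))) =
        (pvScan ini b0 t :: (b0 :: t).erase (pvScan ini b0 t)).map (fun i => (i, pvGet ini i)) := by
      simp
    rw [this]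
    exact (hperm.map _).symm

lemma pvSel_pairwise (ini : List Int) : ∀ (rem : List Int), rem.Pairwise (· < ·) →
    (pvSel ini rem).Pairwise
      (fun p q => p.2 < q.2 ∨ (p.2 = q.2 ∧ p.1 < q.1)) := by
  intro rem
  induction rem using pvSel.induct ini with
  | case1 => simp [pvSel]
  | case2 b0 t b ih =>
    intro hpw
    rw [pvSel]
    have hmem : pvScan ini b0 t ∈ b0 :: t := pvScan_mem ini t b0
    have hpw' : ((b0 :: t).erase (pvScan ini b0 t)).Pairwise (· < ·) :=
      hpw.sublist (List.erase_sublist ..)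
    refine List.Pairwise.cons ?_ (ih hpw')
    intro q hq
    obtain ⟨hq1, hq2⟩ := pvSel_mem ini _ q hq
    have hq1' : q.1 ∈ b0 :: t := List.mem_of_mem_erase hq1
    have hqne : q.1 ≠ pvScan ini b0 t := by
      intro h
      exact (List.Pairwise.nodup hpw).not_mem_erase (h ▸ hq1)
    obtain ⟨_, hmin⟩ := pvScan_spec ini t b0 hpw.of_cons
      (fun x hx => (List.pairwise_cons.mp hpw).1 x hx)
    have := hmin q.1 hq1' hqne
    rw [hq2]
    simpa using this

lemma pvEnumerate_getElem? : ∀ (xs : List Int) (s : Int) (k : Nat),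
    (PySem.List.enumerate xs s)[k]? = xs[k]?.map (fun v => (s + (k : Int), v)) := by
  intro xs
  induction xs with
  | nil => simp [PySem.List.enumerate_nil]
  | cons x xs ih =>
    intro s k
    rw [PySem.List.enumerate_cons]
    cases k with
    | zero => simp
    | succ k =>
      simp only [List.getElem?_cons_succ]
      rw [ih (s+1) k]
      cases xs[k]? <;> simp <;> ring_nf

lemma pvMap_range_eq_enumerate (ini : List Int) :
    (PySem.List.pyRange 0 ini.length 1).map (fun i => (i, pvGet ini i)) =
      PySem.List.enumerate ini 0 := by
  apply List.ext_getElem?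
  intro k
  rw [pvEnumerate_getElem? ini 0 k]
  by_cases hk : k < ini.length
  · rw [List.getElem?_eq_getElem (by simpa [PySem.List.length_pyRange_one] using hk),
        List.getElem?_eq_getElem hk]
    simp only [List.getElem_map, PySem.List.getElem_pyRange_one, Option.map_some]
    simp [pvGet, List.getD_eq_getElem?_getD, List.getElem?_eq_getElem hk]
  · rw [List.getElem?_eq_none (by simpa [PySem.List.length_pyRange_one] using Nat.le_of_not_lt hk),
        List.getElem?_eq_none (Nat.le_of_not_lt hk)]
    simp

lemma pvDict_build (ini : List Int) : ∀ (l : List Int) (d : PySem.Dict Int Int),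
    (∀ i ∈ l, d.contains i = false) → l.Nodup →
    (l.foldl (fun d i => d.insert i (PySem.List.pyGetD ini i 0)) d).items =
      d.items ++ l.map (fun i => (i, pvGet ini i)) := by
  intro l
  induction l with
  | nil => simp
  | cons i l ih =>
    intro d hc hnd
    simp only [List.foldl_cons, List.map_cons]
    rw [ih _ ?_ hnd.of_cons]
    · rw [PySem.Dict.items_insert_of_not_contains _ _ (hc i (by simp))]
      simp [pvGet]
    · intro j hj
      rw [PySem.Dict.contains_insert]
      have : j ≠ i := by rintro rfl; exact (List.nodup_cons.mp hnd).1 hj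
      simp [this, hc j (by simp [hj])]

lemma pvDict_items (ini : List Int) :
    ((PySem.List.pyRange 0 ini.length 1).foldl
      (fun d i => d.insert i (PySem.List.pyGetD ini i 0)) PySem.Dict.empty).items =
    PySem.List.enumerate ini 0 := by
  rw [pvDict_build ini _ _ (by simp [PySem.Dict.contains_empty]) (PySem.List.nodup_pyRange_one ..)]
  have he : (PySem.Dict.empty : PySem.Dict Int Int).items = [] := rfl
  rw [he, List.nil_append]
  exact pvMap_range_eq_enumerate ini

lemma pvInsertBy_congr {α : Type} (p q : α → α → Bool) (x : α) :
    ∀ (ys : List α), (∀ y ∈ ys, p x y = q x y) →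
    PySem.List.insertBy p x ys = PySem.List.insertBy q x ys := by
  intro ys
  induction ys with
  | nil => intro _; rfl
  | cons y ys ih =>
    intro h
    simp only [PySem.List.insertBy]
    rw [h y (by simp)]
    by_cases hq : q x y = true
    · simp [hq]
    · simp only [Bool.not_eq_true] at hq
      simp only [hq, Bool.false_eq_true, if_false]
      have := ih (fun z hz => h z (by simp [hz]))
      rw [this]

lemma pvFoldl_insertBy_congr {α : Type} (p q : α → α → Bool) :
    ∀ (L acc : List α), (∀ x ∈ L, ∀ y ∈ acc, p x y = q x y) →
    L.Pairwise (fun a b => p b a = q b a) →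
    L.foldl (fun acc x => PySem.List.insertBy p x acc) acc =
    L.foldl (fun acc x => PySem.List.insertBy q x acc) acc := by
  intro L
  induction L with
  | nil => intro _ _ _; rfl
  | cons a L ih =>
    intro acc hacc hpw
    simp only [List.foldl_cons]
    rw [pvInsertBy_congr p q a acc (hacc a (by simp))]
    apply ih
    · intro x hx y hy
      rcases (PySem.List.mem_insertBy q a y acc).mp hy with rfl | hy
      · exact (List.pairwise_cons.mp hpw).1 x hx
      · exact hacc x (by simp [hx]) y hy
    · exact hpw.of_cons

lemma pvEnum_pairwise_fst (ini : List Int) :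
    (PySem.List.enumerate ini 0).Pairwise (fun a b => a.1 < b.1) := by
  have h := PySem.List.map_fst_enumerate ini (0 : Int)
  have hpw := PySem.List.pairwise_lt_pyRange_one (0 : Int) (0 + (ini.length : Int))
  rw [← h] at hpw
  exact (List.pairwise_map).mp hpw

lemma pvEnum_bounds (ini : List Int) : ∀ x ∈ PySem.List.enumerate ini 0,
    0 ≤ x.1 ∧ x.1 < (ini.length : Int) := by
  intro x hx
  have : x.1 ∈ (PySem.List.enumerate ini (0:Int)).map (·.1) := List.mem_map_of_mem hx
  rw [PySem.List.map_fst_enumerate] at this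
  have := (PySem.List.mem_pyRange_one).mp this
  omega

lemma pvSorted_stable (ini : List Int) :
    PySem.List.sorted (PySem.List.enumerate ini 0) (fun p => p.2) =
    PySem.List.sorted (PySem.List.enumerate ini 0)
      (fun p => p.2 * (ini.length : Int) + p.1) := by
  rw [PySem.List.sorted_eq_foldl_insertBy, PySem.List.sorted_eq_foldl_insertBy]
  apply pvFoldl_insertBy_congr
  · intro x _ y hy
    simp at hy
  · have hb := pvEnum_bounds ini
    apply (pvEnum_pairwise_fst ini).imp_of_mem
    intro a b ha hb' hab
    obtain ⟨ha0, ha1⟩ := pvEnum_bounds ini a ha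
    obtain ⟨hb0, hb1⟩ := pvEnum_bounds ini b hb'
    -- b is later (b.1 > a.1 is false: hab : a.1 < b.1, and condition compares (p b a = q b a)): later element b vs earlier a
    have : (b.2 < a.2) ↔ (b.2 * (ini.length : Int) + b.1 < a.2 * (ini.length : Int) + a.1) := by
      constructor
      · intro h
        nlinarith
      · intro h
        by_contra hc
        rw [not_lt] at hc
        nlinarith
    simp only [decide_eq_decide]
    exact this

lemma pvSel_bounds (ini : List Int) : ∀ p ∈ pvSel ini (PySem.List.pyRange 0 ini.length 1),
    0 ≤ p.1 ∧ p.1 < (ini.length : Int) := by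
  intro p hp
  have := (pvSel_mem ini _ p hp).1
  have := (PySem.List.mem_pyRange_one).mp this
  omega

lemma pvSorted_eq_sel (ini : List Int) :
    PySem.List.sorted (PySem.List.enumerate ini 0) (fun p => p.2) =
    pvSel ini (PySem.List.pyRange 0 ini.length 1) := by
  rw [pvSorted_stable]
  apply PySem.List.sorted_eq_of_perm_of_pairwise_lt
  · exact (pvSel_perm ini _).trans (by rw [pvMap_range_eq_enumerate])
  · have hpw := pvSel_pairwise ini (PySem.List.pyRange 0 ini.length 1)
      (PySem.List.pairwise_lt_pyRange_one 0 (ini.length : Int))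
    apply hpw.imp_of_mem
    intro p q hp hq hpq
    obtain ⟨hp0, hp1⟩ := pvSel_bounds ini p hp
    obtain ⟨hq0, hq1⟩ := pvSel_bounds ini q hq
    rcases hpq with h | ⟨h1, h2⟩
    · nlinarith
    · rw [h1]; omega

def pvStep (ini : List Int) (st : List Int × List (Int × Int)) : List Int × List (Int × Int) :=
  let rem := st.1
  let best :=
    (PySem.List.slice rem (some 1) none).foldl
      (fun b i =>
        if PySem.List.pyGetD ini i 0 < PySem.List.pyGetD ini b 0 then i else b)
      (PySem.List.pyGetD rem 0 0)
  ((PySem.List.remove? rem best).getD rem,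
   st.2 ++ [(best, PySem.List.pyGetD ini best 0)])

lemma pvStep_cons (ini : List Int) (x : Int) (t : List Int) (acc : List (Int × Int)) :
    pvStep ini (x :: t, acc) =
      ((x :: t).erase (pvScan ini x t),
       acc ++ [(pvScan ini x t, pvGet ini (pvScan ini x t))]) := by
  have hbest : (PySem.List.slice (x :: t) (some 1) none).foldl
      (fun b i =>
        if PySem.List.pyGetD ini i 0 < PySem.List.pyGetD ini b 0 then i else b)
      (PySem.List.pyGetD (x :: t) 0 0) = pvScan ini x t := by
    rw [PySem.List.slice_from_one, PySem.List.pyGetD_zero_cons]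
    rfl
  simp only [pvStep, hbest]
  simp [PySem.List.remove?_eq_some_erase (x :: t) (pvScan ini x t) (pvScan_mem ini t x), pvGet]

lemma pvLoopGen (ini : List Int) : ∀ (l : List Int) (rem : List Int) (acc : List (Int × Int)),
    l.length ≤ rem.length →
    (l.foldl (fun st _ => pvStep ini st) (rem, acc)).2 =
      acc ++ (pvSel ini rem).take l.length := by
  intro l
  induction l with
  | nil => intro rem acc _; simp
  | cons e l ih =>
    intro rem acc hlen
    have hne : rem ≠ [] := by
      intro h
      subst h
      simp at hlen
    obtain ⟨x, t, rfl⟩ := List.exists_cons_of_ne_nil hne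
    simp only [List.foldl_cons]
    rw [pvStep_cons]
    rw [ih _ _ ?_]
    · rw [pvSel]
      simp [List.take_succ_cons, List.append_assoc]
    · rw [List.length_erase_of_mem (pvScan_mem ini t x)]
      simp only [List.length_cons] at hlen ⊢
      omega

lemma pvSel_length (ini : List Int) (rem : List Int) :
    (pvSel ini rem).length = rem.length := by
  have := (pvSel_perm ini rem).length_eq
  simpa using this

theorem tresp_spec' : ∀ (ini : List Int), 4 ≤ ini.length → tresp ini = tresp_alt ini := by
  intro ini hpre
  have hn : (PySem.List.pyRange 0 (ini.length : Int) 1).length = ini.length := by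
    rw [PySem.List.length_pyRange_one]; omega
  have hSlen : (pvSel ini (PySem.List.pyRange 0 (ini.length : Int) 1)).length = ini.length := by
    rw [pvSel_length, hn]
  set S := pvSel ini (PySem.List.pyRange 0 (ini.length : Int) 1) with hS
  have hA : tresp ini =
      (PySem.List.pyGetD S 1 (0, 0), PySem.List.pyGetD S 2 (0, 0), PySem.List.pyGetD S 3 (0, 0)) := by
    simp only [tresp, pvDict_items, pvSorted_eq_sel, hS]
  have hlen4 : (PySem.List.pyRange (0:Int) 4 1).length = 4 := by decide
  have hloop := pvLoopGen ini (PySem.List.pyRange 0 4 1)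
      (PySem.List.pyRange 0 (ini.length : Int) 1) [] (by rw [hlen4, hn]; exact hpre)
  have hB : tresp_alt ini =
      (PySem.List.pyGetD (S.take 4) 1 (0, 0), PySem.List.pyGetD (S.take 4) 2 (0, 0),
       PySem.List.pyGetD (S.take 4) 3 (0, 0)) := by
    simp only [tresp_alt]
    rw [show (fun (st : List Int × List (Int × Int)) (_ : Int) =>
        ((PySem.List.remove? st.1
            ((PySem.List.slice st.1 (some 1) none).foldl
              (fun b i => if PySem.List.pyGetD ini i 0 < PySem.List.pyGetD ini b 0 then i else b)
              (PySem.List.pyGetD st.1 0 0))).getD st.1,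
          st.2 ++ [(((PySem.List.slice st.1 (some 1) none).foldl
              (fun b i => if PySem.List.pyGetD ini i 0 < PySem.List.pyGetD ini b 0 then i else b)
              (PySem.List.pyGetD st.1 0 0)), PySem.List.pyGetD ini ((PySem.List.slice st.1 (some 1) none).foldl
              (fun b i => if PySem.List.pyGetD ini i 0 < PySem.List.pyGetD ini b 0 then i else b)
              (PySem.List.pyGetD st.1 0 0)) 0)])) = (fun st _ => pvStep ini st) from rfl]
    rw [hloop, hlen4]
    simp [hS]
  rw [hA, hB]
  have htake : ∀ k : Nat, k < 4 → PySem.List.pyGetD (S.take 4) (k : Int) (0, 0) =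
      PySem.List.pyGetD S (k : Int) (0, 0) := by
    intro k hk
    rw [PySem.List.pyGetD_natCast, PySem.List.pyGetD_natCast]
    rw [List.getD_eq_getElem?_getD, List.getD_eq_getElem?_getD]
    rw [List.getElem?_take_of_lt hk]
  have h1 := htake 1 (by omega)
  have h2 := htake 2 (by omega)
  have h3 := htake 3 (by omega)
  norm_num at h1 h2 h3
  rw [h1, h2, h3]


-- ===== VERDICT (by name: the statement is the Claim_ definition above) =====
theorem tresp_spec : Claim_equal_tresp := by
  intro ini _ hpre
  exact tresp_spec' ini hpre
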